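-- pv_equiv track=rewrite | github.com/GoluKumar4024/Quantum-safe-algorithm | Twofish_POC/Twofish_MDS.py | matrix_modulo
-- ===== SOURCE A (Python) =====
-- def poly_multi_modulo(poly_one, poly_two, irreducible_polynomial):
--     product = 0
--     while poly_one > 0 and poly_two > 0:
--         if poly_two & 1:
--             product ^= poly_one
--         if poly_one & 0x80:
--             poly_one = (poly_one << 1) ^ irreducible_polynomial
--         else:
--             poly_one <<= 1
--         poly_two >>= 1
--     return product
--
-- def matrix_modulo(mds_matrix, input_vector, irreducible_polynomial):
--     output_vector = []
--     for i in range(4):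
--         value = 0
--         for j in range(4):
--             value ^= poly_multi_modulo(input_vector[i], mds_matrix[j][i], irreducible_polynomial)
--         output_vector.append(value)
--     return output_vector
-- ===== SOURCE B (Python) =====
-- def gf_multiply(a, b, irreducible_polynomial):
--     """Russian-peasant product in GF(2), written recursively: once either
--     operand is exhausted the product is 0, otherwise fold in `a` for the low
--     bit of `b`, double `a` (reducing on overflow) and recurse on b >> 1."""
--     if a <= 0 or b <= 0:
--         return 0
--     doubled = (a << 1) ^ irreducible_polynomial if a & 0x80 else a << 1
--     rest = gf_multiply(doubled, b >> 1, irreducible_polynomial)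
--     return rest ^ a if b & 1 else rest
--
--
-- def matrix_modulo(mds_matrix, input_vector, irreducible_polynomial):
--     # Row-major, single sweep over the matrix: all four output bytes are
--     # accumulated in place, one matrix row at a time (XOR-accumulation is
--     # order-independent, so the transposed traversal gives the same result).
--     output_vector = [0, 0, 0, 0]
--     for j in range(4):
--         row = mds_matrix[j]
--         for i in range(4):
--             output_vector[i] ^= gf_multiply(input_vector[i], row[i], irreducible_polynomial)
--     return output_vector
-- ===== Notes on version B (the rewrite author's own statement) =====
-- stated objective: alternative
-- what changed: B sweeps the matrix row-major, XOR-accumulating all four output bytes in place in one pass per row (instead of A's column-major per-output inner loop), and replaces the iterative while-loop GF multiply with a recursive Russian-peasant multiply; Pre_ only excludes the inputs where A raises IndexError (fewer than 4 rows/entries).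
import Mathlib
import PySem

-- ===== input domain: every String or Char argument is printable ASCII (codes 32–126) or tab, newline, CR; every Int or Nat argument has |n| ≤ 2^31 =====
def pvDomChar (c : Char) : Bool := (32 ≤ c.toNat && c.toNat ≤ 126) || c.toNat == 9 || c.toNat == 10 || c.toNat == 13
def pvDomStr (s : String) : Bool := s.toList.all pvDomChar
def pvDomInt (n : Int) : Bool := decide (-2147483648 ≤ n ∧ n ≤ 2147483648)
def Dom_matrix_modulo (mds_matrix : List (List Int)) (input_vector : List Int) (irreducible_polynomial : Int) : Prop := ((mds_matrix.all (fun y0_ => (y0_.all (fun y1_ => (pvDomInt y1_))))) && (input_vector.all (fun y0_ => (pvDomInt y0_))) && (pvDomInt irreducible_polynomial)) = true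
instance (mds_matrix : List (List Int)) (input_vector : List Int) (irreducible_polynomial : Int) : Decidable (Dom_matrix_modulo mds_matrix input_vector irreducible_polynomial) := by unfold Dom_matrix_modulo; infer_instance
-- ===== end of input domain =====

-- B sweeps the matrix row-major, accumulating all four output bytes in place (XOR order is
-- irrelevant), with a recursive Russian-peasant GF multiply instead of A's iterative helper.

-- termination helper for both multiplies (the multiplier is halved each step)
theorem pvShiftR_toNat_lt (n : Int) (h : 0 < n) : (n >>> (1 : Nat)).toNat < n.toNat := by
  rcases n with n | n
  · have hn : 0 < n := by exact_mod_cast (Int.ofNat_eq_natCast n ▸ h)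
    show ((((n >>> 1 : Nat)) : Int)).toNat < (Int.ofNat n).toNat
    simp [Nat.shiftRight_one, Int.ofNat_eq_natCast]
    omega
  · omega

-- ===== PORT A =====
-- A's module helper poly_multi_modulo (its while-loop, carrying `product`)
def pmmGo (product poly_one poly_two irreducible_polynomial : Int) : Int :=
  if 0 < poly_one ∧ 0 < poly_two then
    pmmGo
      (if PySem.Int.band poly_two 1 ≠ 0 then PySem.Int.bxor product poly_one else product)
      (if PySem.Int.band poly_one 128 ≠ 0 then PySem.Int.bxor (poly_one <<< (1 : Nat)) irreducible_polynomial
       else poly_one <<< (1 : Nat))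
      (poly_two >>> (1 : Nat))
      irreducible_polynomial
  else product
termination_by poly_two.toNat
decreasing_by exact pvShiftR_toNat_lt _ (by omega)

def poly_multi_modulo (poly_one poly_two irreducible_polynomial : Int) : Int :=
  pmmGo 0 poly_one poly_two irreducible_polynomial

def matrix_modulo (mds_matrix : List (List Int)) (input_vector : List Int) (irreducible_polynomial : Int) : List Int :=
  (PySem.List.pyRange 0 4 1).foldl (fun output_vector i =>
    output_vector ++ [(PySem.List.pyRange 0 4 1).foldl (fun value j =>
      PySem.Int.bxor value (poly_multi_modulo (PySem.List.pyGetD input_vector i 0)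
        (PySem.List.pyGetD (PySem.List.pyGetD mds_matrix j []) i 0) irreducible_polynomial)) 0]) []

-- ===== PORT B =====
-- B's recursive Russian-peasant multiply
def gf_multiply (a b irreducible_polynomial : Int) : Int :=
  if a ≤ 0 ∨ b ≤ 0 then 0
  else
    let doubled := if PySem.Int.band a 128 ≠ 0 then PySem.Int.bxor (a <<< (1 : Nat)) irreducible_polynomial
                   else a <<< (1 : Nat)
    let rest := gf_multiply doubled (b >>> (1 : Nat)) irreducible_polynomial
    if PySem.Int.band b 1 ≠ 0 then PySem.Int.bxor rest a else rest
termination_by b.toNat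
decreasing_by exact pvShiftR_toNat_lt _ (by omega)

def matrix_modulo_alt (mds_matrix : List (List Int)) (input_vector : List Int) (irreducible_polynomial : Int) : List Int :=
  (PySem.List.pyRange 0 4 1).foldl (fun output_vector j =>
    let row := PySem.List.pyGetD mds_matrix j []
    (PySem.List.pyRange 0 4 1).foldl (fun output_vector i =>
      PySem.List.pySetD output_vector i
        (PySem.Int.bxor (PySem.List.pyGetD output_vector i 0)
          (gf_multiply (PySem.List.pyGetD input_vector i 0) (PySem.List.pyGetD row i 0) irreducible_polynomial)))
      output_vector)
    [0, 0, 0, 0]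

-- ===== PRECONDITION & SPEC =====
-- Pre_ excludes exactly the inputs on which A raises IndexError: it indexes the first 4
-- elements of input_vector and of the first 4 rows of mds_matrix.
def Pre_matrix_modulo (mds_matrix : List (List Int)) (input_vector : List Int) (irreducible_polynomial : Int) : Prop :=
  4 ≤ input_vector.length ∧ 4 ≤ mds_matrix.length ∧ ∀ row ∈ mds_matrix.take 4, 4 ≤ row.length
instance (mds_matrix : List (List Int)) (input_vector : List Int) (irreducible_polynomial : Int) : Decidable (Pre_matrix_modulo mds_matrix input_vector irreducible_polynomial) := by unfold Pre_matrix_modulo; infer_instance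

def pvWitness_matrix_modulo : List (List Int) × List Int × Int :=
  ([[1, 239, 91, 91], [91, 1, 239, 91], [91, 91, 1, 239], [239, 91, 91, 1]], [18, 52, 86, 120], 357)

def Spec_matrix_modulo (mds_matrix : List (List Int)) (input_vector : List Int) (irreducible_polynomial : Int) (out : List Int) : Prop := out = matrix_modulo_alt mds_matrix input_vector irreducible_polynomial
instance (mds_matrix : List (List Int)) (input_vector : List Int) (irreducible_polynomial : Int) (out : List Int) : Decidable (Spec_matrix_modulo mds_matrix input_vector irreducible_polynomial out) := by unfold Spec_matrix_modulo; infer_instance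

-- ===== CLAIM (what is proved, stated in full; the proofs are below) =====
def Claim_equal_matrix_modulo : Prop := ∀ (mds_matrix : List (List Int)) (input_vector : List Int) (irreducible_polynomial : Int), Dom_matrix_modulo mds_matrix input_vector irreducible_polynomial → Pre_matrix_modulo mds_matrix input_vector irreducible_polynomial → Spec_matrix_modulo mds_matrix input_vector irreducible_polynomial (matrix_modulo mds_matrix input_vector irreducible_polynomial)

-- ===== LEMMAS AND PROOFS =====

theorem pvZero_bxor (a : Int) : PySem.Int.bxor 0 a = a := by
  rw [PySem.Int.bxor_comm]; exact PySem.Int.bxor_zero a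

theorem pvBxor_assoc (a b c : Int) : PySem.Int.bxor (PySem.Int.bxor a b) c = PySem.Int.bxor a (PySem.Int.bxor b c) := by
  unfold PySem.Int.bxor
  split_ifs <;> simp_all [Nat.xor_assoc] <;> omega

-- unfolding equations for A's while-loop
theorem pmmGo_stop (p a b irr : Int) (h : ¬(0 < a ∧ 0 < b)) : pmmGo p a b irr = p := by
  rw [pmmGo]; simp [h]

theorem pmmGo_step (p a b irr : Int) (ha : 0 < a) (hb : 0 < b) :
    pmmGo p a b irr =
      pmmGo (if PySem.Int.band b 1 ≠ 0 then PySem.Int.bxor p a else p)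
        (if PySem.Int.band a 128 ≠ 0 then PySem.Int.bxor (a <<< (1 : Nat)) irr else a <<< (1 : Nat))
        (b >>> (1 : Nat)) irr := by
  rw [pmmGo]; simp [ha, hb]

-- the accumulator is xor-carried through A's loop
theorem pmmGo_acc : ∀ (n : Nat) (p a b irr : Int), b.toNat ≤ n →
    pmmGo p a b irr = PySem.Int.bxor p (pmmGo 0 a b irr) := by
  intro n
  induction n with
  | zero =>
    intro p a b irr hb
    have h : ¬(0 < a ∧ 0 < b) := by omega
    rw [pmmGo_stop _ _ _ _ h, pmmGo_stop _ _ _ _ h, PySem.Int.bxor_zero]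
  | succ n ih =>
    intro p a b irr hb
    by_cases hg : 0 < a ∧ 0 < b
    · rw [pmmGo_step p a b irr hg.1 hg.2, pmmGo_step 0 a b irr hg.1 hg.2]
      have hlt := pvShiftR_toNat_lt b hg.2
      rw [ih _ _ _ _ (by omega), ih (if PySem.Int.band b 1 ≠ 0 then PySem.Int.bxor 0 a else 0) _ _ _ (by omega)]
      by_cases hbit : PySem.Int.band b 1 ≠ 0 <;>
        simp [hbit, pvZero_bxor, pvBxor_assoc]
    · rw [pmmGo_stop _ _ _ _ hg, pmmGo_stop _ _ _ _ hg, PySem.Int.bxor_zero]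

-- B's recursive multiply computes the same value as A's loop
theorem pvGf_eq_pmm : ∀ (n : Nat) (a b irr : Int), b.toNat ≤ n →
    gf_multiply a b irr = poly_multi_modulo a b irr := by
  intro n
  induction n with
  | zero =>
    intro a b irr hb
    have h : a ≤ 0 ∨ b ≤ 0 := by omega
    rw [gf_multiply, if_pos h]
    unfold poly_multi_modulo
    rw [pmmGo_stop _ _ _ _ (by omega)]
  | succ n ih =>
    intro a b irr hb
    by_cases hg : 0 < a ∧ 0 < b
    · have hlt := pvShiftR_toNat_lt b hg.2
      rw [gf_multiply, if_neg (by omega)]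
      unfold poly_multi_modulo
      rw [pmmGo_step 0 a b irr hg.1 hg.2,
        pmmGo_acc (b >>> (1 : Nat)).toNat _ _ _ _ le_rfl,
        ← poly_multi_modulo, ← ih _ _ _ (by omega)]
      by_cases hbit : PySem.Int.band b 1 ≠ 0 <;>
        simp [hbit, pvZero_bxor, PySem.Int.bxor_comm]
    · rw [gf_multiply, if_pos (by omega)]
      unfold poly_multi_modulo
      rw [pmmGo_stop _ _ _ _ hg]

theorem pvGf_eq (a b irr : Int) : gf_multiply a b irr = poly_multi_modulo a b irr :=
  pvGf_eq_pmm b.toNat a b irr le_rfl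

-- B's inner sweep over one row, applied to a concrete 4-element output list
theorem pvInner (v row : List Int) (irr x0 x1 x2 x3 : Int) :
    ([0, 1, 2, 3] : List Int).foldl
      (fun output_vector i =>
        PySem.List.pySetD output_vector i
          (PySem.Int.bxor (PySem.List.pyGetD output_vector i 0)
            (gf_multiply (PySem.List.pyGetD v i 0) (PySem.List.pyGetD row i 0) irr)))
      [x0, x1, x2, x3] =
    [PySem.Int.bxor x0 (gf_multiply (PySem.List.pyGetD v 0 0) (PySem.List.pyGetD row 0 0) irr),
     PySem.Int.bxor x1 (gf_multiply (PySem.List.pyGetD v 1 0) (PySem.List.pyGetD row 1 0) irr),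
     PySem.Int.bxor x2 (gf_multiply (PySem.List.pyGetD v 2 0) (PySem.List.pyGetD row 2 0) irr),
     PySem.Int.bxor x3 (gf_multiply (PySem.List.pyGetD v 3 0) (PySem.List.pyGetD row 3 0) irr)] := by
  simp [List.foldl, PySem.List.pySetD, PySem.List.pySet?, PySem.List.pyGetD, PySem.List.pyGet?,
    PySem.List.pyIdx?, List.set]

-- ===== VERDICT (by name: the statement is the Claim_ definition above) =====
theorem matrix_modulo_spec : Claim_equal_matrix_modulo := by
  intro m v irr _ _
  show matrix_modulo m v irr = matrix_modulo_alt m v irr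
  unfold matrix_modulo matrix_modulo_alt
  rw [show PySem.List.pyRange 0 4 1 = [0, 1, 2, 3] from by decide]
  conv_rhs => rw [List.foldl_cons]
  simp only [pvInner]
  conv_rhs => rw [List.foldl_cons]
  simp only [pvInner]
  conv_rhs => rw [List.foldl_cons]
  simp only [pvInner]
  conv_rhs => rw [List.foldl_cons]
  simp only [pvInner]
  conv_rhs => rw [List.foldl_nil]
  simp only [List.foldl_cons, List.foldl_nil, pvGf_eq, List.nil_append, List.cons_append]
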